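-- pv_equiv track=rewrite | github.com/Munklinde96/Data_Visualization | segment_plot.py | get_mods_height_distribution
-- ===== SOURCE A (Python) =====
-- def get_mods_height_distribution(mods):
--     #sort by first pos then color
--     mods = sorted(mods, key=lambda x: (x[0], x[1]))
--     mods_list_list = []
--     mods_list = [mods[0]]
--     mods_list_list.append(mods_list)
--     pos = mods[0][0]
--     color = mods[0][1]
--     for i in range(1, len(mods)):
--         mod = mods[i]
--         if mod[0] == pos and mod[1] == color:
--             mods_list[-1] = (mods_list[-1][0], mods_list[-1][1], mods_list[-1][2] + mod[2])
--         elif mod[0] == pos and mod[1] != color: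
--             mods_list.append(mod)
--             color = mod[1]
--         else:
--             mods_list = []
--             mods_list.append(mod)
--             mods_list_list.append(mods_list)
--             pos = mod[0]
--             color = mod[1]
--     return mods_list_list
-- ===== SOURCE B (Python) =====
-- def get_mods_height_distribution(mods):
--     # groupby-style decomposition: sort, split into runs of equal position,
--     # and within each run split into runs of equal color, summing heights.
--     def span(lst, key):
--         # longest prefix of lst whose key equals key(lst[0]), and the rest
--         k = key(lst[0])
--         i = 1
--         while i < len(lst) and key(lst[i]) == k:
--             i += 1
--         return lst[:i], lst[i:]
--
--     def group_colors(lst):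
--         if not lst:
--             return []
--         grp, rest = span(lst, lambda m: m[1])
--         merged = (grp[0][0], grp[0][1], sum(m[2] for m in grp))
--         return [merged] + group_colors(rest)
--
--     def group_pos(lst):
--         if not lst:
--             return []
--         grp, rest = span(lst, lambda m: m[0])
--         return [group_colors(grp)] + group_pos(rest)
--
--     return group_pos(sorted(mods, key=lambda x: (x[0], x[1])))
-- ===== Notes on version B (the rewrite author's own statement) =====
-- stated objective: idiomatic
-- what changed: A's single fold with mutable aliased group state (pos/color trackers, in-place update of the last tuple) is replaced by a groupby-style decomposition: split the sorted list into runs of equal position, then each run into runs of equal color, summing heights per run.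
import Mathlib
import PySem

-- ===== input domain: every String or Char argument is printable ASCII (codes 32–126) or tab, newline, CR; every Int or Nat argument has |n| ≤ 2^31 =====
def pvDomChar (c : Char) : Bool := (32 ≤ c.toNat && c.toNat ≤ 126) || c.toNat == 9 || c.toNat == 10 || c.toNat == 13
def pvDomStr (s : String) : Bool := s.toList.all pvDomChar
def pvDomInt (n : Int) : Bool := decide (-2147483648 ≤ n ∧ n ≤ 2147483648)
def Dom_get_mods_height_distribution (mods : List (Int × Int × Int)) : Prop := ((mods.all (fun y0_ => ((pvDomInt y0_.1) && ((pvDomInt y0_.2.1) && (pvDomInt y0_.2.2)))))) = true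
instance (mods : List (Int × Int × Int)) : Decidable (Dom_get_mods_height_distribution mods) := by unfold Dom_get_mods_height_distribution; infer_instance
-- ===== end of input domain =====

-- B replaces A's single stateful fold by a groupby-style run-splitting decomposition (idiomatic, same cost).
-- A raises IndexError on the empty list (mods[0]); Pre_ excludes exactly that input.

-- ===== PORT A =====
-- mods_list[-1] = (mods_list[-1][0], mods_list[-1][1], mods_list[-1][2] + v)
def pvUpdLast : List (Int × Int × Int) → Int → List (Int × Int × Int)
  | [], _ => []
  | [(a, b, c)], v => [(a, b, c + v)]
  | x :: y :: ys, v => x :: pvUpdLast (y :: ys) v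

-- the for-loop; state: done = closed groups, cur = current (aliased) group, pos, color trackers
def pvALoop : List (Int × Int × Int) → List (List (Int × Int × Int)) →
    List (Int × Int × Int) → Int → Int → List (List (Int × Int × Int))
  | [], done, cur, _, _ => done ++ [cur]
  | m :: rest, done, cur, pos, color =>
    if m.1 == pos && m.2.1 == color then
      pvALoop rest done (pvUpdLast cur m.2.2) pos color
    else if m.1 == pos then
      pvALoop rest done (cur ++ [m]) pos m.2.1
    else
      pvALoop rest (done ++ [cur]) [m] m.1 m.2.1

def get_mods_height_distribution (mods : List (Int × Int × Int)) : List (List (Int × Int × Int)) :=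
  match PySem.List.sorted2 mods (fun x => x.1) (fun x => x.2.1) false with
  | [] => []   -- Python raises IndexError here (mods[0]); excluded by Pre_
  | m :: rest => pvALoop rest [] [m] m.1 m.2.1

-- ===== PORT B =====
-- group_colors: runs of equal color (span = head :: takeWhile / dropWhile), summing the third component
def pvGroupColors : List (Int × Int × Int) → List (Int × Int × Int)
  | [] => []
  | m :: rest =>
    (m.1, m.2.1, m.2.2 + ((rest.takeWhile (fun x => x.2.1 == m.2.1)).map (fun x => x.2.2)).sum) ::
      pvGroupColors (rest.dropWhile (fun x => x.2.1 == m.2.1))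
  termination_by l => l.length
  decreasing_by simpa using Nat.lt_succ_of_le (List.length_dropWhile_le _ _)

-- group_pos: runs of equal position, each passed to group_colors
def pvGroupPos : List (Int × Int × Int) → List (List (Int × Int × Int))
  | [] => []
  | m :: rest =>
    pvGroupColors (m :: rest.takeWhile (fun x => x.1 == m.1)) ::
      pvGroupPos (rest.dropWhile (fun x => x.1 == m.1))
  termination_by l => l.length
  decreasing_by simpa using Nat.lt_succ_of_le (List.length_dropWhile_le _ _)

def get_mods_height_distribution_alt (mods : List (Int × Int × Int)) : List (List (Int × Int × Int)) :=
  pvGroupPos (PySem.List.sorted2 mods (fun x => x.1) (fun x => x.2.1) false)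

-- ===== PRECONDITION & SPEC =====
-- Pre_ excludes exactly the empty list, on which A raises IndexError (mods[0]).
def Pre_get_mods_height_distribution (mods : List (Int × Int × Int)) : Prop := mods ≠ []
instance (mods : List (Int × Int × Int)) : Decidable (Pre_get_mods_height_distribution mods) := by
  unfold Pre_get_mods_height_distribution; infer_instance

def pvWitness_get_mods_height_distribution : (List (Int × Int × Int)) := [(1, 2, 3), (1, 2, 4), (0, 5, 6)]

def Spec_get_mods_height_distribution (mods : List (Int × Int × Int)) (out : List (List (Int × Int × Int))) : Prop := out = get_mods_height_distribution_alt mods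
instance (mods : List (Int × Int × Int)) (out : List (List (Int × Int × Int))) : Decidable (Spec_get_mods_height_distribution mods out) := by unfold Spec_get_mods_height_distribution; infer_instance

-- ===== CLAIM (what is proved, stated in full; the proofs are below) =====
def Claim_equal_get_mods_height_distribution : Prop := ∀ (mods : List (Int × Int × Int)), Dom_get_mods_height_distribution mods → Pre_get_mods_height_distribution mods → Spec_get_mods_height_distribution mods (get_mods_height_distribution mods)

-- ===== LEMMAS AND PROOFS =====

theorem pvUpdLast_append (init : List (Int × Int × Int)) (a b c v : Int) :
    pvUpdLast (init ++ [(a, b, c)]) v = init ++ [(a, b, c + v)] := by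
  induction init with
  | nil => rfl
  | cons x xs ih =>
    cases xs with
    | nil => rfl
    | cons y ys => simpa [pvUpdLast] using ih

-- main invariant: A's loop, with the last (open) element of cur exposed, equals B's run-splitting
theorem pvALoop_eq (rest : List (Int × Int × Int)) :
    ∀ (init : List (Int × Int × Int)) (a b c : Int) (done : List (List (Int × Int × Int))),
    pvALoop rest done (init ++ [(a, b, c)]) a b =
      done ++ ((init ++ pvGroupColors ((a, b, c) :: rest.takeWhile (fun x => x.1 == a))) ::
        pvGroupPos (rest.dropWhile (fun x => x.1 == a))) := by
  induction rest with
  | nil =>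
    intro init a b c done
    simp [pvALoop, pvGroupColors, pvGroupPos]
  | cons m rs ih =>
    intro init a b c done
    obtain ⟨a', b', c'⟩ := m
    by_cases h1 : a' = a
    · by_cases h2 : b' = b
      · subst h1; subst h2
        rw [show pvALoop ((a', b', c') :: rs) done (init ++ [(a', b', c)]) a' b' =
              pvALoop rs done (pvUpdLast (init ++ [(a', b', c)]) c') a' b' by
            simp [pvALoop]]
        rw [pvUpdLast_append, ih]
        simp [pvGroupColors, add_assoc]
      · subst h1
        rw [show pvALoop ((a', b', c') :: rs) done (init ++ [(a', b, c)]) a' b =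
              pvALoop rs done ((init ++ [(a', b, c)]) ++ [(a', b', c')]) a' b' by
            simp [pvALoop, h2]]
        rw [ih]
        simp [pvGroupColors, h2]
    · rw [show pvALoop ((a', b', c') :: rs) done (init ++ [(a, b, c)]) a b =
            pvALoop rs (done ++ [init ++ [(a, b, c)]]) ([] ++ [(a', b', c')]) a' b' by
          simp [pvALoop, h1]]
      rw [ih]
      simp [pvGroupColors, pvGroupPos, h1]

-- ===== VERDICT (by name: the statement is the Claim_ definition above) =====
theorem get_mods_height_distribution_spec : Claim_equal_get_mods_height_distribution := by
  intro mods _ hpre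
  unfold Spec_get_mods_height_distribution get_mods_height_distribution get_mods_height_distribution_alt
  cases hs : PySem.List.sorted2 mods (fun x => x.1) (fun x => x.2.1) false with
  | nil =>
    have hp := PySem.List.sorted2_perm mods (fun x => x.1) (fun x => x.2.1) false
    rw [hs] at hp
    exact absurd (List.nil_perm.mp hp) hpre
  | cons m rest =>
    obtain ⟨a, b, c⟩ := m
    show pvALoop rest [] [(a, b, c)] a b = pvGroupPos ((a, b, c) :: rest)
    rw [pvGroupPos]
    simpa using pvALoop_eq rest [] a b c []
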